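-- pv_equiv track=rewrite | github.com/taladjidi/photon_weave | photon_weave/extra/einsum_constructor.py | measure_matrix
-- ===== SOURCE A (Python) =====
-- import itertools
-- from typing import TYPE_CHECKING, Dict, List, Union
--
-- def measure_matrix(state_objs: list, states: list) -> str:
--     """
--     Produces an Einstein sum string. It's application exposes
--     the listed states, so they could be measured.
--
--     Parameters
--     ----------
--     state_objs: list
--         List of all State objects which are in the product space
--         The order should reflect the order in the tensoring
--     states: List[BaseState]
--         List of State objects which should be measured
--
--     Notes
--     -----
--     - State should not be transposed, only reshaped
--     """
--     einsum_list_list: List[List[int]] = [[], []]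
--     einsum_dict: Dict["BaseState", List[int]] = {s: [] for s in state_objs}
--     counter = itertools.count(start=0)
--
--     for _ in range(2):
--         for so in state_objs:
--             c = next(counter)
--             if so in states:
--                 einsum_list_list[1].append(c)
--             einsum_list_list[0].append(c)
--
--     einsum_list = ["".join([chr(97 + s) for s in e]) for e in einsum_list_list]
--     return f"{einsum_list[0]}->{einsum_list[1]}"
-- ===== SOURCE B (Python) =====
-- def measure_matrix(state_objs: list, states: list) -> str:
--     """Single pass: find measured positions once, derive the second index
--     block by +n offset arithmetic, and write the left side in closed form."""
--     n = len(state_objs)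
--     measured = [i for i, so in enumerate(state_objs) if so in states]
--     left = "".join(chr(97 + i) for i in range(2 * n))
--     right = "".join(chr(97 + i) for i in measured) + "".join(chr(97 + i + n) for i in measured)
--     return f"{left}->{right}"
-- ===== Notes on version B (the rewrite author's own statement) =====
-- stated objective: simpler
-- what changed: B finds the measured positions in one enumerate pass and derives the second index block by +n offset arithmetic and the left side as a closed-form range, replacing A's double counter loop and unused dict build.
import Mathlib
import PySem

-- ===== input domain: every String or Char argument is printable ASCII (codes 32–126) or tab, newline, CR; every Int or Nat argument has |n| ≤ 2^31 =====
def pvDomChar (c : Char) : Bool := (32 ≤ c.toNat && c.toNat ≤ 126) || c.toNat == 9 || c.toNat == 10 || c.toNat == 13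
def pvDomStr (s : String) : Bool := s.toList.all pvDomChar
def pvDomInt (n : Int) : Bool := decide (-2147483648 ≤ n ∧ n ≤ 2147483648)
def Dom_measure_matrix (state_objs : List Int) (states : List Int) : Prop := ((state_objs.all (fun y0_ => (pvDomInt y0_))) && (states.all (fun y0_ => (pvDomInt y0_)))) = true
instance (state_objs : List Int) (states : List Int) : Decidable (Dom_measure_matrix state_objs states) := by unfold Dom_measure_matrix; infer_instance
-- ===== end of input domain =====

-- B replaces A's two counter passes by one measured-positions pass plus offset arithmetic (objective: simpler).

-- chr(97 + s); exact for 0 ≤ 97 + s below the surrogate range, which holds for all indices produced here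
def mmChr (s : Int) : Char := Char.ofNat (97 + s).toNat

-- ===== PORT A =====
-- the loop body: c = next(counter); if so in states: einsum_list_list[1].append(c); einsum_list_list[0].append(c)
def mmStep (states : List Int) (acc : List Int × List Int × Int) (so : Int) : List Int × List Int × Int :=
  let c := acc.2.2
  (acc.1 ++ [c], (if states.contains so then acc.2.1 ++ [c] else acc.2.1), c + 1)

-- einsum_dict is built by A but never read; it is pure dead code and omitted here
def measure_matrix (state_objs : List Int) (states : List Int) : String :=
  let st := (List.range 2).foldl (fun acc _ => state_objs.foldl (mmStep states) acc) ([], [], 0)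
  String.ofList (st.1.map mmChr) ++ "->" ++ String.ofList (st.2.1.map mmChr)

-- ===== PORT B =====
def measure_matrix_alt (state_objs : List Int) (states : List Int) : String :=
  let n : Int := state_objs.length
  let measured := ((PySem.List.enumerate state_objs 0).filter (fun p => states.contains p.2)).map (·.1)
  let left := String.ofList ((PySem.List.pyRange 0 (2 * n) 1).map mmChr)
  let right := String.ofList (measured.map mmChr) ++ String.ofList (measured.map (fun i => mmChr (i + n)))
  left ++ "->" ++ right

-- ===== PRECONDITION & SPEC =====
def Spec_measure_matrix (state_objs : List Int) (states : List Int) (out : String) : Prop := out = measure_matrix_alt state_objs states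
instance (state_objs : List Int) (states : List Int) (out : String) : Decidable (Spec_measure_matrix state_objs states out) := by unfold Spec_measure_matrix; infer_instance

-- ===== CLAIM (what is proved, stated in full; the proofs are below) =====
def Claim_equal_measure_matrix : Prop := ∀ (state_objs : List Int) (states : List Int), Dom_measure_matrix state_objs states → Spec_measure_matrix state_objs states (measure_matrix state_objs states)

-- ===== LEMMAS AND PROOFS =====

-- positions (as counter values starting at c) of elements of xs that lie in states
def mpos (states : List Int) (c : Int) : List Int → List Int
  | [] => []
  | x :: xs => if states.contains x then c :: mpos states (c + 1) xs else mpos states (c + 1) xs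

theorem fold_inner (states : List Int) (xs : List Int) : ∀ (l0 l1 : List Int) (c : Int),
    xs.foldl (mmStep states) (l0, l1, c) =
      (l0 ++ PySem.List.pyRange c (c + xs.length) 1, l1 ++ mpos states c xs, c + xs.length) := by
  induction xs with
  | nil => intro l0 l1 c; simp [mpos, PySem.List.pyRange_one_eq_nil (le_refl c)]
  | cons x xs ih =>
    intro l0 l1 c
    have hlen : (((x :: xs).length : Int)) = (xs.length : Int) + 1 := by
      simp
    have hr : PySem.List.pyRange c (c + ((xs.length : Int) + 1)) 1
        = c :: PySem.List.pyRange (c + 1) (c + 1 + (xs.length : Int)) 1 := by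
      rw [show c + ((xs.length : Int) + 1) = c + 1 + (xs.length : Int) by ring,
        PySem.List.pyRange_one_cons (by omega)]
    simp only [List.foldl_cons, mmStep, ih, mpos, hlen, hr]
    by_cases h : x ∈ states <;>
      simp [h, List.contains_eq_mem, List.append_assoc] <;> omega

theorem mpos_shift (states : List Int) (xs : List Int) : ∀ (k c : Int),
    mpos states (k + c) xs = (mpos states k xs).map (· + c) := by
  induction xs with
  | nil => intro k c; simp [mpos]
  | cons x xs ih =>
    intro k c
    by_cases h : x ∈ states <;>
      simp [mpos, h, List.contains_eq_mem, show k + c + 1 = (k + 1) + c by ring, ih (k + 1) c]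

theorem mpos_enum (states : List Int) (xs : List Int) : ∀ (c : Int),
    mpos states c xs = ((PySem.List.enumerate xs c).filter (fun p => states.contains p.2)).map (·.1) := by
  induction xs with
  | nil => intro c; simp [mpos, PySem.List.enumerate_nil]
  | cons x xs ih =>
    intro c
    by_cases h : x ∈ states <;>
      simp [mpos, h, List.contains_eq_mem, PySem.List.enumerate_cons, ih (c + 1)]

-- ===== VERDICT (by name: the statement is the Claim_ definition above) =====
theorem measure_matrix_spec : Claim_equal_measure_matrix := by
  intro so states _
  unfold Spec_measure_matrix measure_matrix measure_matrix_alt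
  have h2 : List.range 2 = [0, 1] := by decide
  simp only [h2, List.foldl_cons, List.foldl_nil]
  rw [fold_inner, fold_inner]
  have hsplit : PySem.List.pyRange 0 (2 * (so.length : Int)) 1
      = PySem.List.pyRange 0 (so.length : Int) 1
        ++ PySem.List.pyRange (so.length : Int) ((so.length : Int) + (so.length : Int)) 1 := by
    rw [← PySem.List.pyRange_one_append 0 (so.length : Int) _ (by positivity) (by omega)]
    congr 1; ring
  have hshift : mpos states ((0 : Int) + (so.length : Int)) so
      = (mpos states 0 so).map (· + (so.length : Int)) := mpos_shift states so 0 _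
  simp only [zero_add] at hshift ⊢
  rw [hsplit, hshift, ← mpos_enum]
  simp [List.map_map, Function.comp_def]
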